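-- pv_equiv track=rewrite | github.com/kevinkicho/SEAJ-TSIA-study2024-25 | scripts/find_financial_pages.py | find_runs
-- ===== SOURCE A (Python) =====
-- def find_runs(pages: list[int], gap: int = 2) -> list[tuple[int, int]]:
--     """Cluster contiguous pages: list of (first, last)."""
--     if not pages:
--         return []
--     pages = sorted(pages)
--     runs = [[pages[0], pages[0]]]
--     for p in pages[1:]:
--         if p - runs[-1][1] <= gap:
--             runs[-1][1] = p
--         else:
--             runs.append([p, p])
--     return [tuple(r) for r in runs]
-- ===== SOURCE B (Python) =====
-- def find_runs(pages: list[int], gap: int = 2) -> list[tuple[int, int]]: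
--     """Cluster contiguous pages: list of (first, last)."""
--     sp = sorted(pages)
--     if not sp:
--         return []
--     brks = [(a, b) for a, b in zip(sp, sp[1:]) if b - a > gap]
--     starts = [sp[0]] + [b for _, b in brks]
--     ends = [a for a, _ in brks] + [sp[-1]]
--     return list(zip(starts, ends))
-- ===== Notes on version B (the rewrite author's own statement) =====
-- stated objective: alternative
-- what changed: Replaces A's single pass that mutates the last [first,last] cell of a growing runs list with a two-phase construction: filter the adjacent pairs of the sorted list for break points, then zip the derived run starts with the run ends.
import Mathlib
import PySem

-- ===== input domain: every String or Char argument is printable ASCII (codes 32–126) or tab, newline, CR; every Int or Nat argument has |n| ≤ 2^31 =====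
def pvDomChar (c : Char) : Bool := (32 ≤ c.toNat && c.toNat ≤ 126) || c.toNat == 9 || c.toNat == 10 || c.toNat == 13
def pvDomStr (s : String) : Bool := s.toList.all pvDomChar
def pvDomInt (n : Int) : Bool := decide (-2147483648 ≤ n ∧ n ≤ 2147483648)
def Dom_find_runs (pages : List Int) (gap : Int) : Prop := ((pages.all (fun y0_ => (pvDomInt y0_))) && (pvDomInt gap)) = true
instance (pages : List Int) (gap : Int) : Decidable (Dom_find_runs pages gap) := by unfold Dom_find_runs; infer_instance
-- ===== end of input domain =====

-- B replaces A's running mutable [first,last] accumulator with a two-phase construction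
-- (filter adjacent pairs for breaks, then zip run starts with run ends); same cost, alternative structure.

-- ===== PORT A =====
-- runs[-1][1] = p : rewrite the second component of the last cell
def pvSetLast : List (Int × Int) → Int → List (Int × Int)
  | [], _ => []
  | [r], p => [(r.1, p)]
  | r :: rs, p => r :: pvSetLast rs p

def find_runs (pages : List Int) (gap : Int) : List (Int × Int) :=
  if pages = [] then []
  else
    match PySem.List.sorted pages (fun x => x) false with
    | [] => []
    | p0 :: rest =>
      rest.foldl (fun runs p =>
        if p - (runs.getLastD (p0, p0)).2 ≤ gap then pvSetLast runs p
        else runs ++ [(p, p)]) [(p0, p0)]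

-- ===== PORT B =====
def find_runs_alt (pages : List Int) (gap : Int) : List (Int × Int) :=
  match PySem.List.sorted pages (fun x => x) false with
  | [] => []
  | h :: t =>
    -- brks = [(a,b) for a,b in zip(sp, sp[1:]) if b - a > gap]
    let brks := ((h :: t).zip t).filter (fun ab => decide (ab.2 - ab.1 > gap))
    let starts := h :: brks.map (·.2)
    let ends := brks.map (·.1) ++ [t.getLastD h]   -- sp[-1]
    starts.zip ends

-- ===== PRECONDITION & SPEC =====
def Spec_find_runs (pages : List Int) (gap : Int) (out : List (Int × Int)) : Prop := out = find_runs_alt pages gap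
instance (pages : List Int) (gap : Int) (out : List (Int × Int)) : Decidable (Spec_find_runs pages gap out) := by unfold Spec_find_runs; infer_instance

-- ===== CLAIM (what is proved, stated in full; the proofs are below) =====
def Claim_equal_find_runs : Prop := ∀ (pages : List Int) (gap : Int), Dom_find_runs pages gap → Spec_find_runs pages gap (find_runs pages gap)

-- ===== LEMMAS AND PROOFS =====

/-- Common recursive characterization of the runs of `prev :: l`, run head `start`. -/
def runsR (gap start prev : Int) : List Int → List (Int × Int)
  | [] => [(start, prev)]
  | p :: l => if p - prev ≤ gap then runsR gap start p l else (start, prev) :: runsR gap p p l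

/-- Recursive form of the break-pair list. -/
def brkR (gap : Int) : Int → List Int → List (Int × Int)
  | _, [] => []
  | prev, p :: l => (if gap < p - prev then [(prev, p)] else []) ++ brkR gap p l

lemma filter_zip_eq_brkR (gap : Int) (l : List Int) : ∀ prev : Int,
    ((prev :: l).zip l).filter (fun ab => decide (ab.2 - ab.1 > gap)) = brkR gap prev l := by
  induction l with
  | nil => intro prev; simp [brkR]
  | cons p l ih =>
    intro prev
    simp only [List.zip_cons_cons, List.filter_cons, brkR, ih]
    by_cases h : gap < p - prev <;> simp [h]

lemma zip_brk_eq_runsR (gap : Int) (l : List Int) : ∀ start prev : Int,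
    (start :: (brkR gap prev l).map (·.2)).zip ((brkR gap prev l).map (·.1) ++ [l.getLastD prev])
      = runsR gap start prev l := by
  induction l with
  | nil => intro start prev; simp [brkR, runsR]
  | cons p l ih =>
    intro start prev
    by_cases h : p - prev ≤ gap
    · have h' : ¬ gap < p - prev := by omega
      simp only [brkR, h', List.getLastD_cons, runsR, if_pos h]
      exact ih start p
    · have h' : gap < p - prev := by omega
      simp only [brkR, h', if_pos, List.map_cons, List.getLastD_cons, runsR, if_neg h,
        List.cons_append, List.zip_cons_cons]
      exact congrArg _ (ih p p)

lemma pvSetLast_append (R : List (Int × Int)) (s pr p : Int) :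
    pvSetLast (R ++ [(s, pr)]) p = R ++ [(s, p)] := by
  induction R with
  | nil => simp [pvSetLast]
  | cons r R ih =>
    cases R with
    | nil => simp [pvSetLast]
    | cons r' R' => simpa [pvSetLast] using ih

lemma foldl_eq_runsR (gap : Int) (l : List Int) : ∀ (R : List (Int × Int)) (start prev : Int) (d : Int × Int),
    l.foldl (fun runs p => if p - (runs.getLastD d).2 ≤ gap then pvSetLast runs p
        else runs ++ [(p, p)]) (R ++ [(start, prev)]) = R ++ runsR gap start prev l := by
  induction l with
  | nil => intro R start prev d; simp [runsR]
  | cons p l ih =>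
    intro R start prev d
    have hlast : (R ++ [(start, prev)]).getLastD d = (start, prev) := by
      simp [List.getLastD_eq_getLast?]
    by_cases h : p - prev ≤ gap
    · simp only [List.foldl_cons, hlast, if_pos h, pvSetLast_append, runsR]
      rw [ih R start p d]
    · simp only [List.foldl_cons, hlast, if_neg h, runsR]
      rw [ih (R ++ [(start, prev)]) p p d]
      simp

-- ===== VERDICT (by name: the statement is the Claim_ definition above) =====
theorem find_runs_spec : Claim_equal_find_runs := by
  intro pages gap _
  unfold Spec_find_runs find_runs find_runs_alt
  by_cases hp : pages = []
  · subst hp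
    rw [(PySem.List.sorted_eq_nil_iff ([] : List Int) (fun x => x) false).mpr rfl]
    simp
  · simp only [if_neg hp]
    cases hs : PySem.List.sorted pages (fun x => x) false with
    | nil => exact absurd ((PySem.List.sorted_eq_nil_iff _ _ _).mp hs) hp
    | cons h t =>
      have hA : t.foldl (fun runs p => if p - (runs.getLastD (h, h)).2 ≤ gap
            then pvSetLast runs p else runs ++ [(p, p)]) [(h, h)] = runsR gap h h t := by
        simpa using foldl_eq_runsR gap t [] h h (h, h)
      have hB : ((h :: (((h :: t).zip t).filter (fun ab => decide (ab.2 - ab.1 > gap))).map (·.2)).zip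
            ((((h :: t).zip t).filter (fun ab => decide (ab.2 - ab.1 > gap))).map (·.1) ++ [t.getLastD h]))
          = runsR gap h h t := by
        rw [filter_zip_eq_brkR gap t h]; exact zip_brk_eq_runsR gap t h h
      exact hA.trans hB.symm
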